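-- pv_equiv track=rewrite | github.com/marvel2950/Data-Structures-and-Algorithms-Problems | Level 2/Heap/Sum of elements between k1 samllest and k2 smallest numbers.py | sumBetweenK1K2
-- ===== SOURCE A (Python) =====
-- class MaxHeap:
--     def __init__(self,items=[]):
--         self.heap = [0]
--         for i in items:
--             self.heap.append(i)
--             self.__floatUp(len(self.heap)-1)
--
--     def __floatUp(self,index):
--         parent = index//2
--         if index<=1:
--             return
--         elif self.heap[index]>self.heap[parent]:
--             self.__swap(index,parent)
--             self.__floatUp(parent)
--
--     def __swap(self,i,j):
--         self.heap[i],self.heap[j] = self.heap[j],self.heap[i]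
--
--     def push(self,data):
--         self.heap.append(data)
--         self.__floatUp(len(self.heap)-1)
--
--     def pop(self):
--         if len(self.heap)>2:
--             self.__swap(1,len(self.heap)-1)
--             max = self.heap.pop()
--             self.__bubbleDown(1)
--         elif len(self.heap)==2:
--             max = self.heap.pop()
--         else:
--             max = False
--         return max
--
--     def __bubbleDown(self,index):
--         left = index*2
--         right = 2*index +1
--         largest = index
--         if len(self.heap)>left and self.heap[largest]<self.heap[left]:
--             largest = left
--         if len(self.heap)>right and self.heap[largest]<self.heap[right]:
--             largest = right
--         if index!=largest:
--             self.__swap(index,largest)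
--             self.__bubbleDown(largest)
--
--     def peek(self):
--         if self.heap[1]:
--             return self.heap[1]
--         else:
--             return False
--
-- def kthSmallest(arr,k):
--     m = MaxHeap()
--     for i in arr:
--         m.push(i)
--         if len(m.heap)-1>k:
--             m.pop()
--     return m.peek()
--
-- def sumBetweenK1K2(arr,k1,k2):
--     sum = 0
--     k1Ele = kthSmallest(arr,k1)
--     k2Ele = kthSmallest(arr,k2)
--     for i in arr:
--         if i>k1Ele and i<k2Ele:
--             sum=sum+i
--     return sum
-- ===== SOURCE B (Python) =====
-- def sumBetweenK1K2(arr, k1, k2):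
--     # Sort once; the k-th smallest (with the heap's "k > n gives the max" rule)
--     # is sorted(arr)[min(k, n) - 1]; then sum the strictly-between elements.
--     s = sorted(arr)
--     n = len(s)
--     lo = s[min(k1, n) - 1]
--     hi = s[min(k2, n) - 1]
--     return sum(x for x in arr if lo < x < hi)
-- ===== Notes on version B (the rewrite author's own statement) =====
-- stated objective: faster
-- what changed: Replaces the hand-written bounded max-heap (push/floatUp/pop/bubbleDown run over the array once per order statistic) by a single library sort plus direct indexing for both order statistics, then one filtered sum.
import Mathlib
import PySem

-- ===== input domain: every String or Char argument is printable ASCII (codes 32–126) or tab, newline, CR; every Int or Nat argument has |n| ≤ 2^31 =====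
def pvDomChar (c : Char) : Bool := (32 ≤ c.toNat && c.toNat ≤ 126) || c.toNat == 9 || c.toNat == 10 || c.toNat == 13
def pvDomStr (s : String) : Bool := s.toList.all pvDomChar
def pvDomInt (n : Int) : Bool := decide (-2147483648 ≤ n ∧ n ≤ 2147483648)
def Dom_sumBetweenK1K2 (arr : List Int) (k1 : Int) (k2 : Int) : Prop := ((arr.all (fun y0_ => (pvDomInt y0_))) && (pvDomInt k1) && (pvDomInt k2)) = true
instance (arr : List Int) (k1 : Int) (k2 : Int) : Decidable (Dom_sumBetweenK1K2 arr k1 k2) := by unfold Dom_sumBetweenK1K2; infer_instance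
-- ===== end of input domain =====

-- B replaces A's hand-written bounded max-heap (two heap passes) by one sort plus direct
-- order-statistic indexing and a filtered sum: a structurally different algorithm, measurably
-- faster (library sort vs per-element interpreted heap operations).

-- ===== PORT A =====
-- The heap is Python's `self.heap` list (dummy 0 kept at index 0).  Every list read/write A
-- performs is at an in-range index, where `List.getD … 0` / `List.set` are exact.

-- __swap(i, j)
def pvSwap (h : List Int) (i j : Nat) : List Int :=
  (h.set i (h.getD j 0)).set j (h.getD i 0)

-- __floatUp(index)
def pvFloatUp (h : List Int) (index : Nat) : List Int :=
  if index ≤ 1 then h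
  else if h.getD (index / 2) 0 < h.getD index 0 then
    pvFloatUp (pvSwap h index (index / 2)) (index / 2)
  else h
termination_by index
decreasing_by omega

-- push(data): append, then float up the last position
def pvPush (h : List Int) (d : Int) : List Int :=
  pvFloatUp (h ++ [d]) ((h ++ [d]).length - 1)

-- `largest` after the two sequential `if`s of __bubbleDown (left = index*2, right = 2*index+1)
def pvLargest (h : List Int) (index : Nat) : Nat :=
  let l1 := if index * 2 < h.length ∧ h.getD index 0 < h.getD (index * 2) 0 then index * 2 else index
  if 2 * index + 1 < h.length ∧ h.getD l1 0 < h.getD (2 * index + 1) 0 then 2 * index + 1 else l1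

-- needed by pvBubbleDown's termination proof
theorem pvLargest_gt (h : List Int) (index : Nat) (hne : index ≠ pvLargest h index) :
    index < pvLargest h index ∧ pvLargest h index < h.length := by
  unfold pvLargest at hne ⊢
  dsimp only at hne ⊢
  split_ifs at hne ⊢ <;> omega

-- __bubbleDown(index)
def pvBubbleDown (h : List Int) (index : Nat) : List Int :=
  if hne : index ≠ pvLargest h index then
    pvBubbleDown (pvSwap h index (pvLargest h index)) (pvLargest h index)
  else h
termination_by h.length - index
decreasing_by
  have := pvLargest_gt h index hne
  simp only [pvSwap, List.length_set]
  omega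

-- pop(): Python's pop also RETURNS the removed max (False on an empty heap); kthSmallest
-- discards that value, so the port returns the updated heap only.
def pvPop (h : List Int) : List Int :=
  if 2 < h.length then
    pvBubbleDown ((pvSwap h 1 (h.length - 1)).dropLast) 1
  else if h.length = 2 then h.dropLast
  else h

-- kthSmallest(arr, k); `len(m.heap)-1 > k` is `k < (length : Int) - 1`.
-- peek(): `heap[1] if heap[1] else False` — the False branch fires exactly when heap[1] == 0
-- and False == 0 in the comparisons sumBetweenK1K2 makes, so the numeric value is heap[1]
-- in both branches; under Pre_ index 1 is in range, where getD is exact.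
def pvKthSmallest (arr : List Int) (k : Int) : Int :=
  let m := arr.foldl (fun h i =>
    let h' := pvPush h i
    if k < (h'.length : Int) - 1 then pvPop h' else h') [0]
  m.getD 1 0

def sumBetweenK1K2 (arr : List Int) (k1 : Int) (k2 : Int) : Int :=
  let k1Ele := pvKthSmallest arr k1
  let k2Ele := pvKthSmallest arr k2
  arr.foldl (fun sum i => if k1Ele < i ∧ i < k2Ele then sum + i else sum) 0

-- ===== PORT B =====
-- Source B: sort once; k-th smallest (heap rule: k > n gives the max) is sorted(arr)[min(k,n)-1];
-- then sum the strictly-between elements.  s[min(k,n)-1] is in range under Pre_; B raises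
-- (pyGet? = none) only on arr = [], which Pre_ excludes.
def sumBetweenK1K2_alt (arr : List Int) (k1 : Int) (k2 : Int) : Int :=
  let s := PySem.List.sorted arr (fun x => x) false
  let n : Int := s.length
  let lo := (PySem.List.pyGet? s (min k1 n - 1)).getD 0
  let hi := (PySem.List.pyGet? s (min k2 n - 1)).getD 0
  (arr.filter (fun x => lo < x && x < hi)).sum

-- ===== PRECONDITION & SPEC =====
-- A raises IndexError (heap[1] on the empty heap) exactly when arr is empty or k1 ≤ 0 or
-- k2 ≤ 0; Pre_ excludes exactly those inputs and nothing else.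
def Pre_sumBetweenK1K2 (arr : List Int) (k1 : Int) (k2 : Int) : Prop :=
  arr ≠ [] ∧ 1 ≤ k1 ∧ 1 ≤ k2
instance (arr : List Int) (k1 : Int) (k2 : Int) : Decidable (Pre_sumBetweenK1K2 arr k1 k2) := by
  unfold Pre_sumBetweenK1K2; infer_instance

def pvWitness_sumBetweenK1K2 : List Int × Int × Int := ([3, 1, 4, 1, 5], 1, 4)

def Spec_sumBetweenK1K2 (arr : List Int) (k1 : Int) (k2 : Int) (out : Int) : Prop :=
  out = sumBetweenK1K2_alt arr k1 k2
instance (arr : List Int) (k1 : Int) (k2 : Int) (out : Int) : Decidable (Spec_sumBetweenK1K2 arr k1 k2 out) := by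
  unfold Spec_sumBetweenK1K2; infer_instance

-- ===== CLAIM (what is proved, stated in full; the proofs are below) =====
def Claim_equal_sumBetweenK1K2 : Prop := ∀ (arr : List Int) (k1 : Int) (k2 : Int), Dom_sumBetweenK1K2 arr k1 k2 → Pre_sumBetweenK1K2 arr k1 k2 → Spec_sumBetweenK1K2 arr k1 k2 (sumBetweenK1K2 arr k1 k2)

-- ===== LEMMAS AND PROOFS =====

theorem swapPerm (l : List Int) (i j : Nat) (hi : i < l.length) (hj : j < l.length) :
    ((l.set i l[j]).set j l[i]).Perm l := by
  rw [List.perm_iff_count]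
  intro a
  by_cases hij : i = j
  · subst hij; simp
  · have h2 : j < (l.set i l[j]).length := by simpa using hj
    rw [List.count_set h2, List.count_set hi]
    rw [List.getElem_set_ne (by omega)]
    have c1 : (l[i] == a) = true → 1 ≤ List.count a l := by
      intro h; simp at h; subst h; exact List.count_pos_iff.2 (List.getElem_mem hi)
    have c2 : (l[j] == a) = true → 1 ≤ List.count a l := by
      intro h; simp at h; subst h; exact List.count_pos_iff.2 (List.getElem_mem hj)
    by_cases e1 : (l[i] == a) = true <;> by_cases e2 : (l[j] == a) = true
    · rw [if_pos e1, if_pos e2]; have := c1 e1; omega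
    · rw [if_pos e1, if_neg e2]; have := c1 e1; omega
    · rw [if_neg e1, if_pos e2]; have := c2 e2; omega
    · rw [if_neg e1, if_neg e2]; omega

theorem pvSwap_length (h : List Int) (i j : Nat) : (pvSwap h i j).length = h.length := by
  simp [pvSwap]

theorem pvSwap_perm (h : List Int) (i j : Nat) (hi : i < h.length) (hj : j < h.length) :
    (pvSwap h i j).Perm h := by
  unfold pvSwap
  rw [List.getD_eq_getElem h 0 hi, List.getD_eq_getElem h 0 hj]
  exact swapPerm h i j hi hj

theorem pvSwap_getD (h : List Int) (i j t : Nat) (hi : i < h.length) (hj : j < h.length) :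
    (pvSwap h i j).getD t 0 =
      if t = j then h.getD i 0 else if t = i then h.getD j 0 else h.getD t 0 := by
  unfold pvSwap
  by_cases htj : t = j
  · subst htj
    rw [if_pos rfl]
    rw [List.getD_eq_getElem _ 0 (by simpa using hj)]
    rw [List.getElem_set_self]
  · rw [if_neg htj]
    have hlen : (h.set i (h.getD j 0)).length = h.length := by simp
    by_cases hti : t = i
    · subst hti
      rw [if_pos rfl]
      rw [List.getD_eq_getElem _ 0 (by simpa using hi)]
      rw [List.getElem_set_ne (by omega)]
      rw [List.getElem_set_self, List.getD_eq_getElem _ 0 hj]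
    · rw [if_neg hti]
      by_cases ht : t < h.length
      · rw [List.getD_eq_getElem _ 0 (by simpa using ht)]
        rw [List.getElem_set_ne (by omega), List.getElem_set_ne (by omega)]
        rw [List.getD_eq_getElem _ 0 ht]
      · rw [List.getD_eq_default _ 0 (by simpa using ht), List.getD_eq_default _ 0 (by omega)]

def MH (h : List Int) : Prop :=
  ∀ j, 2 ≤ j → j < h.length → h.getD j 0 ≤ h.getD (j / 2) 0

def AH (h : List Int) (idx : Nat) : Prop :=
  (∀ j, 2 ≤ j → j < h.length → j ≠ idx → h.getD j 0 ≤ h.getD (j / 2) 0) ∧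
  (∀ j, 2 ≤ j → j < h.length → j / 2 = idx → 2 ≤ idx → h.getD j 0 ≤ h.getD (idx / 2) 0)

theorem AH_step (h : List Int) (idx : Nat) (h2 : 2 ≤ idx) (hlt : idx < h.length) (hA : AH h idx)
    (hgt : h.getD (idx / 2) 0 < h.getD idx 0) : AH (pvSwap h idx (idx / 2)) (idx / 2) := by
  obtain ⟨A1, A2⟩ := hA
  have hp : idx / 2 < h.length := by omega
  have G : ∀ t, (pvSwap h idx (idx / 2)).getD t 0 =
      if t = idx / 2 then h.getD idx 0 else if t = idx then h.getD (idx / 2) 0 else h.getD t 0 :=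
    fun t => pvSwap_getD h idx (idx / 2) t hlt hp
  constructor
  · intro j hj2 hjl hjp
    rw [pvSwap_length] at hjl
    rw [G j, G (j / 2), if_neg hjp]
    by_cases hji : j = idx
    · subst hji
      rw [if_pos rfl, if_pos rfl]
      omega
    · rw [if_neg hji]
      by_cases e1 : j / 2 = idx / 2
      · rw [if_pos e1]
        have := A1 j hj2 hjl hji
        rw [e1] at this
        omega
      · rw [if_neg e1]
        by_cases e2 : j / 2 = idx
        · rw [if_pos e2]
          have := A2 j hj2 hjl e2 h2
          omega
        · rw [if_neg e2]
          exact A1 j hj2 hjl hji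
  · intro j hj2 hjl hjp hp2
    rw [pvSwap_length] at hjl
    have hpidx : idx / 2 ≠ idx := by omega
    have hpp : idx / 2 / 2 ≠ idx / 2 := by omega
    have hppi : idx / 2 / 2 ≠ idx := by omega
    rw [G j, G (idx / 2 / 2), if_neg hpp, if_neg hppi]
    have base : h.getD (idx / 2) 0 ≤ h.getD (idx / 2 / 2) 0 := by
      have := A1 (idx / 2) hp2 (by omega) hpidx
      exact this
    by_cases hji : j = idx
    · rw [if_neg (by omega), if_pos hji]
      exact base
    · rw [if_neg (by omega), if_neg hji]
      have hA1 := A1 j hj2 hjl hji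
      rw [hjp] at hA1
      exact le_trans hA1 base

theorem floatUp_main (h : List Int) (idx : Nat) :
    1 ≤ idx → idx < h.length → AH h idx →
    MH (pvFloatUp h idx) ∧ (pvFloatUp h idx).Perm h ∧
      (pvFloatUp h idx).getD 0 0 = h.getD 0 0 := by
  induction h, idx using pvFloatUp.induct with
  | case1 h idx hle =>
    intro h1 hlt hA
    rw [pvFloatUp, if_pos hle]
    refine ⟨?_, List.Perm.refl h, rfl⟩
    intro j hj2 hjl
    exact hA.1 j hj2 hjl (by omega)
  | case2 h idx hgt hcond ih =>
    intro h1 hlt hA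
    rw [pvFloatUp, if_neg hgt, if_pos hcond]
    have hp : idx / 2 < h.length := by omega
    have hsw := AH_step h idx (by omega) hlt hA hcond
    have hl : idx / 2 < (pvSwap h idx (idx / 2)).length := by rw [pvSwap_length]; omega
    obtain ⟨m1, m2, m3⟩ := ih (by omega) hl hsw
    refine ⟨m1, m2.trans (pvSwap_perm h idx (idx / 2) hlt hp), ?_⟩
    rw [m3, pvSwap_getD h idx (idx / 2) 0 hlt hp, if_neg (by omega), if_neg (by omega)]
  | case3 h idx hgt hcond =>
    intro h1 hlt hA
    rw [pvFloatUp, if_neg hgt, if_neg hcond]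
    refine ⟨?_, List.Perm.refl h, rfl⟩
    intro j hj2 hjl
    by_cases hji : j = idx
    · subst hji; omega
    · exact hA.1 j hj2 hjl hji

theorem getD_cons_append (t : List Int) (x : Int) (j : Nat) (hj : j < t.length + 1) :
    (0 :: (t ++ [x])).getD j 0 = (0 :: t).getD j 0 := by
  have : (0 : Int) :: (t ++ [x]) = ((0 :: t) ++ [x]) := by simp
  rw [this]
  exact List.getD_append _ _ 0 j (by simp; omega)

theorem push_shape (t : List Int) (x : Int) (hM : MH (0 :: t)) :
    ∃ t', pvPush (0 :: t) x = 0 :: t' ∧ MH (0 :: t') ∧ t'.Perm (t ++ [x]) := by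
  unfold pvPush
  have hform : ((0 : Int) :: t) ++ [x] = 0 :: (t ++ [x]) := by simp
  rw [hform]
  have hlen : ((0 : Int) :: (t ++ [x])).length = t.length + 2 := by simp
  have hidx : ((0 : Int) :: (t ++ [x])).length - 1 = t.length + 1 := by simp
  rw [hidx]
  have hA : AH (0 :: (t ++ [x])) (t.length + 1) := by
    constructor
    · intro j hj2 hjl hji
      rw [hlen] at hjl
      rw [getD_cons_append t x j (by omega), getD_cons_append t x (j / 2) (by omega)]
      exact hM j hj2 (by simp; omega)
    · intro j hj2 hjl hjp
      rw [hlen] at hjl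
      omega
  obtain ⟨m1, m2, m3⟩ := floatUp_main (0 :: (t ++ [x])) (t.length + 1) (by omega) (by rw [hlen]; omega) hA
  set r := pvFloatUp (0 :: (t ++ [x])) (t.length + 1) with hr
  have hrlen : r.length = t.length + 2 := by rw [m2.length_eq]; exact hlen
  match hre : r with
  | [] => simp at hrlen
  | a :: r' =>
    have ha : a = 0 := by simpa using m3
    subst ha
    exact ⟨r', rfl, m1, m2.cons_inv⟩

theorem root_max (h : List Int) (hM : MH h) :
    ∀ j, 1 ≤ j → j < h.length → h.getD j 0 ≤ h.getD 1 0 := by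
  intro j
  induction j using Nat.strong_induction_on with
  | _ j ih =>
    intro h1 hl
    rcases Nat.lt_or_ge j 2 with hj | hj
    · have : j = 1 := by omega
      subst this; exact le_refl _
    · exact le_trans (hM j hj hl) (ih (j / 2) (by omega) (by omega) (by omega))

theorem pvLargest_spec_ne (h : List Int) (idx : Nat) (hne : idx ≠ pvLargest h idx) :
    (pvLargest h idx = idx * 2 ∨ pvLargest h idx = 2 * idx + 1) ∧
    idx < pvLargest h idx ∧ pvLargest h idx < h.length ∧
    h.getD idx 0 < h.getD (pvLargest h idx) 0 ∧
    (idx * 2 < h.length → h.getD (idx * 2) 0 ≤ h.getD (pvLargest h idx) 0) ∧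
    (2 * idx + 1 < h.length → h.getD (2 * idx + 1) 0 ≤ h.getD (pvLargest h idx) 0) := by
  unfold pvLargest at hne ⊢
  dsimp only at hne ⊢
  by_cases c1 : idx * 2 < h.length ∧ h.getD idx 0 < h.getD (idx * 2) 0
  · simp only [if_pos c1] at hne ⊢
    by_cases c2 : 2 * idx + 1 < h.length ∧ h.getD (idx * 2) 0 < h.getD (2 * idx + 1) 0
    · simp only [if_pos c2] at hne ⊢
      exact ⟨Or.inr trivial, by omega, by omega, by omega, by omega, by omega⟩
    · simp only [if_neg c2] at hne ⊢
      exact ⟨Or.inl trivial, by omega, by omega, by omega, by omega, by omega⟩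
  · simp only [if_neg c1] at hne ⊢
    by_cases c2 : 2 * idx + 1 < h.length ∧ h.getD idx 0 < h.getD (2 * idx + 1) 0
    · simp only [if_pos c2] at hne ⊢
      exact ⟨Or.inr trivial, by omega, by omega, by omega, by omega, by omega⟩
    · simp only [if_neg c2] at hne ⊢
      exact absurd rfl hne

theorem pvLargest_spec_eq (h : List Int) (idx : Nat) (heq : ¬ idx ≠ pvLargest h idx) :
    (idx * 2 < h.length → h.getD (idx * 2) 0 ≤ h.getD idx 0) ∧
    (2 * idx + 1 < h.length → h.getD (2 * idx + 1) 0 ≤ h.getD idx 0) := by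
  unfold pvLargest at heq
  dsimp only at heq
  rw [not_ne_iff] at heq
  by_cases c1 : idx * 2 < h.length ∧ h.getD idx 0 < h.getD (idx * 2) 0
  · simp only [if_pos c1] at heq
    by_cases c2 : 2 * idx + 1 < h.length ∧ h.getD (idx * 2) 0 < h.getD (2 * idx + 1) 0
    · simp only [if_pos c2] at heq; omega
    · simp only [if_neg c2] at heq
      have h0 : idx = 0 := by omega
      subst h0
      norm_num at c1
  · simp only [if_neg c1] at heq
    by_cases c2 : 2 * idx + 1 < h.length ∧ h.getD idx 0 < h.getD (2 * idx + 1) 0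
    · simp only [if_pos c2] at heq; omega
    · simp only [if_neg c2] at heq; omega

def DH (h : List Int) (idx : Nat) : Prop :=
  (∀ j, 2 ≤ j → j < h.length → j / 2 ≠ idx → h.getD j 0 ≤ h.getD (j / 2) 0) ∧
  (∀ j, 2 ≤ j → j < h.length → j / 2 = idx → 2 ≤ idx → h.getD j 0 ≤ h.getD (idx / 2) 0)

theorem DH_step (h : List Int) (idx : Nat) (h1 : 1 ≤ idx) (hlt : idx < h.length)
    (hD : DH h idx) (hne : idx ≠ pvLargest h idx) :
    DH (pvSwap h idx (pvLargest h idx)) (pvLargest h idx) := by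
  obtain ⟨D1, D2⟩ := hD
  obtain ⟨hLor, hLgt, hLlt, hval, hbl, hbr⟩ := pvLargest_spec_ne h idx hne
  set L := pvLargest h idx with hL
  have G : ∀ t, (pvSwap h idx L).getD t 0 =
      if t = L then h.getD idx 0 else if t = idx then h.getD L 0 else h.getD t 0 :=
    fun t => pvSwap_getD h idx L t hlt hLlt
  have hLhalf : L / 2 = idx := by omega
  constructor
  · intro j hj2 hjl hjp
    rw [pvSwap_length] at hjl
    rw [G j, G (j / 2)]
    by_cases hji : j = idx
    · subst hji
      rw [if_neg (by omega), if_pos rfl, if_neg (by omega), if_neg (by omega)]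
      have := D2 L (by omega) hLlt hLhalf (by omega)
      exact this
    · by_cases hjL : j = L
      · subst hjL
        rw [if_pos rfl, hLhalf, if_neg (by omega), if_pos rfl]
        omega
      · rw [if_neg hjL, if_neg hji]
        by_cases e1 : j / 2 = idx
        · rw [e1, if_neg (by omega), if_pos rfl]
          have : j = idx * 2 ∨ j = 2 * idx + 1 := by omega
          rcases this with hj | hj <;> (subst hj)
          · exact hbl hjl
          · exact hbr hjl
        · rw [if_neg hjp, if_neg e1]
          exact D1 j hj2 hjl e1
  · intro j hj2 hjl hjp hL2
    rw [pvSwap_length] at hjl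
    rw [G j, G (L / 2), hLhalf, if_neg (by omega), if_pos rfl]
    rw [if_neg (by omega), if_neg (by omega)]
    have := D1 j hj2 hjl (by omega)
    rw [hjp] at this
    exact this

theorem bubbleDown_main (h : List Int) (idx : Nat) :
    1 ≤ idx → idx < h.length → DH h idx →
    MH (pvBubbleDown h idx) ∧ (pvBubbleDown h idx).Perm h ∧
      (pvBubbleDown h idx).getD 0 0 = h.getD 0 0 := by
  induction h, idx using pvBubbleDown.induct with
  | case1 h idx hne ih =>
    intro h1 hlt hD
    rw [pvBubbleDown, dif_pos hne]
    obtain ⟨hLor, hLgt, hLlt, hval, hbl, hbr⟩ := pvLargest_spec_ne h idx hne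
    have hsw := DH_step h idx h1 hlt hD hne
    have hl : pvLargest h idx < (pvSwap h idx (pvLargest h idx)).length := by
      rw [pvSwap_length]; omega
    obtain ⟨m1, m2, m3⟩ := ih (by omega) hl hsw
    refine ⟨m1, m2.trans (pvSwap_perm h idx (pvLargest h idx) hlt hLlt), ?_⟩
    rw [m3, pvSwap_getD h idx (pvLargest h idx) 0 hlt hLlt,
      if_neg (by omega), if_neg (by omega)]
  | case2 h idx heq =>
    intro h1 hlt hD
    rw [pvBubbleDown, dif_neg heq]
    obtain ⟨e1, e2⟩ := pvLargest_spec_eq h idx heq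
    refine ⟨?_, List.Perm.refl h, rfl⟩
    intro j hj2 hjl
    by_cases hjp : j / 2 = idx
    · have : j = idx * 2 ∨ j = 2 * idx + 1 := by omega
      rw [hjp]
      rcases this with hj | hj <;> subst hj
      · exact e1 hjl
      · exact e2 hjl
    · exact hD.1 j hj2 hjl hjp

theorem dropLast_set_last (l : List Int) (v : Int) :
    (l.set (l.length - 1) v).dropLast = l.dropLast := by
  apply List.ext_getElem
  · simp
  · intro i h1 h2
    rw [List.getElem_dropLast, List.getElem_dropLast, List.getElem_set_ne]
    simp at h2; omega

theorem pop_shape (y : Int) (rest : List Int) (hr : rest ≠ []) (hM : MH (0 :: y :: rest)) :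
    ∃ t', pvPop (0 :: y :: rest) = 0 :: t' ∧ MH (0 :: t') ∧ t'.Perm rest := by
  have hrl : 1 ≤ rest.length := List.length_pos_iff.2 hr
  have hlen : ((0 : Int) :: y :: rest).length = rest.length + 2 := by simp
  unfold pvPop
  rw [if_pos (by omega)]
  have hg1 : ((0 : Int) :: y :: rest).getD 1 0 = y := rfl
  set g := rest.getLast hr with hgdef
  obtain ⟨n, hn⟩ : ∃ n, rest.length = n + 1 := ⟨rest.length - 1, by omega⟩
  have hgl : ((0 : Int) :: y :: rest).getD (((0 : Int) :: y :: rest).length - 1) 0 = g := by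
    rw [hlen, hn]
    show ((0 : Int) :: y :: rest).getD (n + 1 + 1) 0 = g
    rw [List.getD_cons_succ, List.getD_cons_succ]
    rw [List.getD_eq_getElem _ 0 (by omega)]
    rw [hgdef, List.getLast_eq_getElem hr]
    congr 1; omega
  have hswap : pvSwap ((0 : Int) :: y :: rest) 1 (((0 : Int) :: y :: rest).length - 1) =
      0 :: g :: rest.set (rest.length - 1) y := by
    unfold pvSwap
    rw [hgl, hg1, hlen, hn]
    show ((0 :: y :: rest).set 1 g).set (n + 1 + 1) y = 0 :: g :: rest.set (n + 1 - 1) y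
    simp only [List.set_cons_succ, List.set_cons_zero, Nat.add_sub_cancel]
  have hdrop : ((0 : Int) :: g :: rest.set (rest.length - 1) y).dropLast =
      0 :: g :: rest.dropLast := by
    have hne : (rest.set (rest.length - 1) y) ≠ [] := by
      intro hcon; apply hr; simpa using congrArg List.length hcon
    rw [List.dropLast_cons₂, List.dropLast_cons_of_ne_nil hne]
    rw [dropLast_set_last]
  rw [hswap, hdrop]
  have hvals : ∀ j, 2 ≤ j → j < rest.length + 1 →
      ((0 : Int) :: g :: rest.dropLast).getD j 0 = ((0 : Int) :: y :: rest).getD j 0 := by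
    intro j h2 hj
    obtain ⟨j', rfl⟩ : ∃ j', j = j' + 2 := ⟨j - 2, by omega⟩
    show (g :: rest.dropLast).getD (j' + 1) 0 = (y :: rest).getD (j' + 1) 0
    rw [List.getD_cons_succ, List.getD_cons_succ]
    rw [List.getD_eq_getElem _ 0 (by rw [List.length_dropLast]; omega),
        List.getD_eq_getElem _ 0 (by omega)]
    exact List.getElem_dropLast _
  have hD : DH (0 :: g :: rest.dropLast) 1 := by
    constructor
    · intro j hj2 hjl hjp
      have hl2 : j < rest.length + 1 := by simp at hjl; omega
      rw [hvals j hj2 hl2, hvals (j / 2) (by omega) (by omega)]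
      exact hM j hj2 (by simp; omega)
    · intro j hj2 hjl hjp h12
      omega
  obtain ⟨m1, m2, m3⟩ := bubbleDown_main (0 :: g :: rest.dropLast) 1 (by omega)
    (by simp) hD
  set r := pvBubbleDown ((0 : Int) :: g :: rest.dropLast) 1 with hrr
  match hre : r with
  | [] =>
    have hrlen := m2.length_eq
    simp at hrlen
  | a :: r' =>
    have ha : a = 0 := by simpa using m3
    subst ha
    refine ⟨r', rfl, m1, ?_⟩
    have hperm : r'.Perm (g :: rest.dropLast) := m2.cons_inv
    have hsplit : rest = rest.dropLast ++ [g] := (List.dropLast_append_getLast hr).symm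
    rw [hsplit]
    exact hperm.trans (List.perm_append_singleton g rest.dropLast).symm

theorem dropWhile_head_false (l : List Int) (p : Int → Bool) :
    ∀ b0 B', l.dropWhile p = b0 :: B' → p b0 = false := by
  induction l with
  | nil => intro b0 B' h; simp at h
  | cons a l ih =>
    intro b0 B' h
    by_cases hpa : p a = true
    · rw [List.dropWhile_cons_of_pos hpa] at h; exact ih _ _ h
    · rw [List.dropWhile_cons_of_neg hpa] at h
      cases h; simpa using hpa

-- dropWhile (≤ x) of a sorted list: every element exceeds x

theorem dropWhile_all_gt (s : List Int) (x : Int) (hs : s.Pairwise (· ≤ ·)) :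
    ∀ b ∈ s.dropWhile (fun z => decide (z ≤ x)), x ≤ b := by
  set p : Int → Bool := fun z => decide (z ≤ x) with hp
  match hB : s.dropWhile p with
  | [] => intro b hb; simp at hb
  | b0 :: B' =>
    intro b hb
    have hhead : p b0 = false := dropWhile_head_false s p b0 B' hB
    have hx : x < b0 := by
      rw [hp] at hhead; simpa using hhead
    have hpw : (b0 :: B').Pairwise (· ≤ ·) := by
      rw [← hB]; exact hs.sublist (List.dropWhile_sublist p)
    rcases List.mem_cons.1 hb with rfl | hb'
    · omega
    · have := (List.pairwise_cons.1 hpw).1 b hb'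
      omega

theorem ins_sorted (s : List Int) (x : Int) (hs : s.Pairwise (· ≤ ·)) :
    PySem.List.sorted (s ++ [x]) (fun z => z) false =
      s.takeWhile (fun z => decide (z ≤ x)) ++ x :: s.dropWhile (fun z => decide (z ≤ x)) := by
  set p : Int → Bool := fun z => decide (z ≤ x) with hp
  apply PySem.List.sorted_id_eq_of_perm_of_pairwise
  · have h1 : (s.takeWhile p ++ x :: s.dropWhile p).Perm (x :: (s.takeWhile p ++ s.dropWhile p)) :=
      List.perm_middle
    rw [List.takeWhile_append_dropWhile] at h1
    exact h1.trans (List.perm_append_singleton x s).symm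
  · rw [List.pairwise_append]
    refine ⟨hs.sublist (List.takeWhile_sublist p), ?_, ?_⟩
    · rw [List.pairwise_cons]
      exact ⟨dropWhile_all_gt s x hs, hs.sublist (List.dropWhile_sublist p)⟩
    · intro a ha b hb
      have hax : a ≤ x := by
        have := List.mem_takeWhile_imp ha
        rw [hp] at this; simpa using this
      rcases List.mem_cons.1 hb with rfl | hb'
      · exact hax
      · exact le_trans hax (dropWhile_all_gt s x hs b hb')

theorem pairwise_mono (s : List Int) (hs : s.Pairwise (· ≤ ·)) (i1 i2 : Nat)
    (h12 : i1 ≤ i2) (h2 : i2 < s.length) : s[i1] ≤ s[i2] := by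
  rcases Nat.lt_or_ge i1 i2 with h | h
  · exact (List.pairwise_iff_getElem.1 hs) i1 i2 (by omega) h2 h
  · have : i1 = i2 := by omega
    subst this; exact le_refl _

theorem erase_max_take (s : List Int) (x : Int) (kn : Nat) (hs : s.Pairwise (· ≤ ·))
    (hk : kn ≤ s.length) (h1 : 1 ≤ kn) (y : Int) (hy : y ∈ s.take kn ++ [x])
    (hmax : ∀ z ∈ s.take kn ++ [x], z ≤ y) :
    ((s.take kn ++ [x]).erase y).Perm
      ((PySem.List.sorted (s ++ [x]) (fun z => z) false).take kn) := by
  set p : Int → Bool := fun z => decide (z ≤ x) with hp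
  rw [ins_sorted s x hs]
  set A := s.takeWhile p with hA
  set B := s.dropWhile p with hB
  set j := A.length with hj
  have hAtake : A = s.take j := List.prefix_iff_eq_take.1 (List.takeWhile_prefix p)
  have hjle : j ≤ s.length := by
    have := (List.takeWhile_sublist p (l := s)).length_le
    simpa [← hA, ← hj] using this
  have hsplit : A ++ B = s := List.takeWhile_append_dropWhile
  by_cases hc : kn ≤ j
  · have htake : (A ++ x :: B).take kn = s.take kn := by
      rw [List.take_append, Nat.sub_eq_zero_of_le hc]
      simp only [List.take_zero, List.append_nil]
      rw [hAtake, List.take_take, min_eq_left hc]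
    rw [htake]
    have hyx : y = x := by
      have hxy : x ≤ y := hmax x (by simp)
      have hyx' : y ≤ x := by
        rcases List.mem_append.1 hy with hyt | hyx2
        · have hyA : y ∈ A := by
            rw [hAtake]
            have : s.take kn = (s.take j).take kn := by
              rw [List.take_take, min_eq_left hc]
            rw [this] at hyt
            exact List.mem_of_mem_take hyt
          have := List.mem_takeWhile_imp hyA
          rw [hp] at this; simpa using this
        · simp at hyx2; omega
      omega
    subst hyx
    have h2 := List.Perm.erase y (List.perm_append_singleton y (s.take kn))
    rw [List.erase_cons_head] at h2
    exact h2
  · replace hc : j < kn := by omega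
    have hkn1 : kn - 1 < s.length := by omega
    have hjlt : j < s.length := by omega
    have hBd : B = s.drop j := by
      conv_rhs => rw [← hsplit]
      exact (List.drop_left (l₁ := A) (l₂ := B)).symm
    have hBne : B ≠ [] := by
      intro hcon
      have := congrArg List.length hsplit
      rw [hcon] at this
      simp at this
      omega
    have hsj : x < s[j] := by
      match hBc : B with
      | [] => exact absurd rfl (hBc ▸ hBne)
      | b0 :: B' =>
        have hpb : p b0 = false := dropWhile_head_false s p b0 B' hB.symm
        have hopt : s[j]? = some b0 := by
          rw [← hsplit]
          rw [List.getElem?_append_right (by omega)]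
          simp [hj]
        have hb0 : s[j] = b0 := by
          have := List.getElem?_eq_getElem hjlt
          rw [hopt] at this
          exact (Option.some.inj this).symm
        rw [hb0]
        rw [hp] at hpb; simpa using hpb
    have hy_eq : y = s[kn-1] := by
      have hlast_mem : s[kn-1] ∈ s.take kn := by
        have hb : kn - 1 < (s.take kn).length := by simp; omega
        have := List.getElem_mem hb
        rwa [List.getElem_take] at this
      apply le_antisymm
      · rcases List.mem_append.1 hy with hyt | hyx2
        · obtain ⟨i, hi, hiv⟩ := List.mem_iff_getElem.1 hyt
          rw [List.getElem_take] at hiv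
          subst hiv
          apply pairwise_mono s hs _ _ (by simp at hi; omega) hkn1
        · simp at hyx2; subst hyx2
          exact le_of_lt (lt_of_lt_of_le hsj (pairwise_mono s hs j (kn-1) (by omega) hkn1))
      · exact hmax _ (List.mem_append.2 (Or.inl hlast_mem))
    have htake2 : (A ++ x :: B).take kn = A ++ x :: B.take (kn - j - 1) := by
      rw [List.take_append, List.take_of_length_le (by omega)]
      obtain ⟨m, hm⟩ : ∃ m, kn - j = m + 1 := ⟨kn - j - 1, by omega⟩
      rw [← hj, hm, List.take_succ_cons]
      simp
    rw [htake2]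
    have hTdec : s.take (kn - 1) = A ++ B.take (kn - j - 1) := by
      rw [hAtake, hBd]
      have : kn - 1 = j + (kn - j - 1) := by omega
      rw [this, List.take_add]
    have hLdec : s.take kn = s.take (kn - 1) ++ [s[kn-1]] := by
      have : kn = (kn - 1) + 1 := by omega
      conv_lhs => rw [this]
      rw [List.take_succ]
      congr 1
      rw [List.getElem?_eq_getElem hkn1]
      rfl
    -- erase the max (= s[kn-1]) from (s.take kn ++ [x])
    have e0 : (s.take kn ++ [x]) = s.take (kn - 1) ++ s[kn-1] :: [x] := by
      rw [hLdec, List.append_assoc]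
      rfl
    have e1 : ((s.take kn ++ [x]).erase y).Perm (s.take (kn - 1) ++ [x]) := by
      rw [e0, hy_eq]
      have hperm : (s.take (kn - 1) ++ s[kn-1] :: [x]).Perm (s[kn-1] :: (s.take (kn - 1) ++ [x])) :=
        List.perm_middle
      have h2 := List.Perm.erase s[kn-1] hperm
      rw [List.erase_cons_head] at h2
      exact h2
    have e2 : (s.take (kn - 1) ++ [x]).Perm (x :: s.take (kn - 1)) :=
      List.perm_append_singleton x _
    have e3 : (A ++ x :: B.take (kn - j - 1)).Perm (x :: s.take (kn - 1)) := by
      rw [hTdec]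
      exact List.perm_middle
    exact (e1.trans e2).trans e3.symm

def PVInv (kn : Nat) (p : List Int) (h : List Int) : Prop :=
  ∃ t, h = 0 :: t ∧ MH (0 :: t) ∧
    t.Perm ((PySem.List.sorted p (fun z => z) false).take kn) ∧
    t.length = min kn p.length

theorem tail_le_root (t : List Int) (hM : MH (0 :: t)) : ∀ z ∈ t, z ≤ t.getD 0 0 := by
  intro z hz
  obtain ⟨i, hi, rfl⟩ := List.mem_iff_getElem.1 hz
  have := root_max (0 :: t) hM (i + 1) (by omega) (by simp; omega)
  have e1 : ((0 : Int) :: t).getD (i + 1) 0 = t.getD i 0 := List.getD_cons_succ ..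
  have e2 : ((0 : Int) :: t).getD 1 0 = t.getD 0 0 := List.getD_cons_succ ..
  rw [e1, e2, List.getD_eq_getElem _ 0 hi] at this
  exact this

theorem step_inv (k : Int) (hk : 1 ≤ k) (p h : List Int) (x : Int)
    (hI : PVInv k.toNat p h) :
    PVInv k.toNat (p ++ [x])
      (let h' := pvPush h x; if k < (h'.length : Int) - 1 then pvPop h' else h') := by
  obtain ⟨t, rfl, hM, hperm, hlen⟩ := hI
  obtain ⟨t₁, hpush, hM1, hperm1⟩ := push_shape t x hM
  have hlen1 : t₁.length = t.length + 1 := by rw [hperm1.length_eq]; simp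
  have hslen : (PySem.List.sorted p (fun z => z) false).length = p.length :=
    (PySem.List.sorted_perm p (fun z => z) false).length_eq
  have hkn1 : 1 ≤ k.toNat := by omega
  show PVInv k.toNat (p ++ [x])
    (if k < ((pvPush (0 :: t) x).length : Int) - 1 then pvPop (pvPush (0 :: t) x)
     else pvPush (0 :: t) x)
  rw [hpush]
  have hlens : ((0 : Int) :: t₁).length = t.length + 2 := by simp [hlen1]
  by_cases hcond : k < (((0 : Int) :: t₁).length : Int) - 1
  · rw [if_pos hcond]
    have hcast : (((0 : Int) :: t₁).length : Int) = (t.length : Int) + 2 := by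
      rw [hlens]; push_cast; ring
    have htkn : t.length = k.toNat ∧ k.toNat ≤ p.length := by
      rw [hcast] at hcond; omega
    match ht1 : t₁ with
    | [] => simp at hlen1
    | y :: rest =>
      simp only [List.length_cons] at hlen1
      have hrest : rest ≠ [] := by
        intro hcon; subst hcon; simp only [List.length_nil] at hlen1; omega
      obtain ⟨t₂, hpop, hM2, hperm2⟩ := pop_shape y rest hrest hM1
      rw [hpop]
      have hymax : ∀ z ∈ y :: rest, z ≤ y := by
        have := tail_le_root (y :: rest) hM1
        simpa using this
      have hL : (y :: rest).Perm
          ((PySem.List.sorted p (fun z => z) false).take k.toNat ++ [x]) :=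
        hperm1.trans (hperm.append_right [x])
      have hyL : y ∈ (PySem.List.sorted p (fun z => z) false).take k.toNat ++ [x] :=
        hL.subset (List.mem_cons_self)
      have hmaxL : ∀ z ∈ (PySem.List.sorted p (fun z => z) false).take k.toNat ++ [x], z ≤ y :=
        fun z hz => hymax z (hL.symm.subset hz)
      have hkey := erase_max_take (PySem.List.sorted p (fun z => z) false) x k.toNat
        (PySem.List.sorted_pairwise p (fun z => z)) (by omega) hkn1 y hyL hmaxL
      have hsos : PySem.List.sorted ((PySem.List.sorted p (fun z => z) false) ++ [x]) (fun z => z) false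
          = PySem.List.sorted (p ++ [x]) (fun z => z) false := by
        apply PySem.List.sorted_eq_sorted_of_perm
        · exact fun a b hab => hab
        · exact ((PySem.List.sorted_perm p (fun z => z) false).append_right [x])
      rw [hsos] at hkey
      have hre : rest = (y :: rest).erase y := (List.erase_cons_head y rest).symm
      refine ⟨t₂, rfl, hM2, ?_, ?_⟩
      · refine hperm2.trans ?_
        rw [hre]
        exact (List.Perm.erase y hL).trans hkey
      · have hl2 : t₂.length = rest.length := hperm2.length_eq
        have hlp : (p ++ [x]).length = p.length + 1 := by simp
        rw [hl2, hlp, min_eq_left (by omega)]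
        omega
  · rw [if_neg hcond]
    have hcast : (((0 : Int) :: t₁).length : Int) = (t.length : Int) + 2 := by
      rw [hlens]; push_cast; ring
    have hsmall : t.length + 1 ≤ k.toNat ∧ p.length = t.length := by
      rw [hcast] at hcond; omega
    refine ⟨t₁, rfl, hM1, ?_, ?_⟩
    · have htp : t.Perm p := by
        have ht : ((PySem.List.sorted p (fun z => z) false).take k.toNat) =
            PySem.List.sorted p (fun z => z) false :=
          List.take_of_length_le (by omega)
        rw [ht] at hperm
        exact hperm.trans (PySem.List.sorted_perm p (fun z => z) false)
      have hslen2 : (PySem.List.sorted (p ++ [x]) (fun z => z) false).length = p.length + 1 := by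
        rw [(PySem.List.sorted_perm (p ++ [x]) (fun z => z) false).length_eq]; simp
      rw [List.take_of_length_le (by omega)]
      exact (hperm1.trans (htp.append_right [x])).trans
        (PySem.List.sorted_perm (p ++ [x]) (fun z => z) false).symm
    · have hlp : (p ++ [x]).length = p.length + 1 := by simp
      rw [hlen1, hlp, min_eq_right (by omega)]
      omega

theorem loop_inv (k : Int) (hk : 1 ≤ k) (rest : List Int) :
    ∀ (p h : List Int), PVInv k.toNat p h →
      PVInv k.toNat (p ++ rest)
        (rest.foldl (fun h i =>
          let h' := pvPush h i
          if k < (h'.length : Int) - 1 then pvPop h' else h') h) := by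
  induction rest with
  | nil => intro p h hI; simpa using hI
  | cons x rest ih =>
    intro p h hI
    have h2 := step_inv k hk p h x hI
    have h3 := ih (p ++ [x]) _ h2
    simpa using h3

theorem kth_eq (arr : List Int) (k : Int) (h0 : arr ≠ []) (hk : 1 ≤ k) :
    pvKthSmallest arr k =
      (PySem.List.pyGet? (PySem.List.sorted arr (fun z => z) false)
        (min k ((PySem.List.sorted arr (fun z => z) false).length : Int) - 1)).getD 0 := by
  have hn1 : 1 ≤ arr.length := List.length_pos_iff.2 h0
  have hkn1 : 1 ≤ k.toNat := by omega
  have base : PVInv k.toNat [] [0] := by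
    refine ⟨[], rfl, ?_, ?_, by simp⟩
    · intro j hj2 hjl; simp at hjl; omega
    · have hs0 : PySem.List.sorted ([] : List Int) (fun z => z) false = [] := by
        exact (PySem.List.sorted_eq_nil_iff _ _ _).2 rfl
      rw [hs0]; simp
  have hloop := loop_inv k hk arr [] [0] base
  simp only [List.nil_append] at hloop
  obtain ⟨t, hfin, hM, hperm, hlen⟩ := hloop
  set s := PySem.List.sorted arr (fun z => z) false with hsdef
  have hslen : s.length = arr.length := (PySem.List.sorted_perm arr (fun z => z) false).length_eq
  set m := min k.toNat arr.length with hm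
  have hm1 : 1 ≤ m := by omega
  have htl : t.length = m := hlen
  have htne : t ≠ [] := by
    intro hcon; rw [hcon] at htl; simp at htl; omega
  have htlen0 : 0 < t.length := by omega
  have hmn : m - 1 < s.length := by rw [hslen]; omega
  have htake_len : (s.take k.toNat).length = m := by
    simp [hslen]; omega
  -- LHS
  unfold pvKthSmallest
  rw [hfin]
  have hLHS : ((0 : Int) :: t).getD 1 0 = t[0] := by
    rw [List.getD_cons_succ, List.getD_eq_getElem _ 0 htlen0]
  rw [hLHS]
  -- RHS index
  have hidx : min k ((s.length : Int)) - 1 = ((m - 1 : Nat) : Int) := by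
    rw [hslen]; omega
  rw [hidx, PySem.List.pyGet?_natCast, List.getElem?_eq_getElem hmn]
  show t[0] = s[m-1]
  have hroot := tail_le_root t hM
  have h00 : t.getD 0 0 = t[0] := List.getD_eq_getElem _ 0 htlen0
  rw [h00] at hroot
  have hlast_mem : s[m-1] ∈ s.take k.toNat := by
    have hb : m - 1 < (s.take k.toNat).length := by omega
    have := List.getElem_mem hb
    rwa [List.getElem_take] at this
  apply le_antisymm
  · have h0mem : t[0] ∈ s.take k.toNat := hperm.subset (List.getElem_mem htlen0)
    obtain ⟨i, hi, hiv⟩ := List.mem_iff_getElem.1 h0mem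
    rw [List.getElem_take] at hiv
    rw [← hiv]
    exact pairwise_mono s (PySem.List.sorted_pairwise arr (fun z => z)) i (m-1)
      (by omega) hmn
  · exact hroot _ (hperm.symm.subset hlast_mem)

-- ===== VERDICT (by name: the statement is the Claim_ definition above) =====
theorem sumBetweenK1K2_spec : Claim_equal_sumBetweenK1K2 := by
  intro arr k1 k2 _hD hP
  obtain ⟨h0, hk1, hk2⟩ := hP
  unfold Spec_sumBetweenK1K2 sumBetweenK1K2 sumBetweenK1K2_alt
  rw [kth_eq arr k1 h0 hk1, kth_eq arr k2 h0 hk2]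
  rw [PySem.List.foldl_ite_eq_foldl_filter]
  rw [List.sum_eq_foldl]
  simp
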